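-- pv_equiv track=rewrite | github.com/Dryzhakova/IT-Olympiad | antysymetria.py | amount_antisymmetrics_fragments
-- ===== SOURCE A (Python) =====
-- def antisymmetrics(data_input):
--     # sprawdzamy, czy napis jest antysymetryczny
--     for i in range(len(data_input)):
--         if data_input[i] == data_input[-i-1]:
--             return False
--     return True
--
-- def amount_antisymmetrics_fragments(data_input, output):
--     count = 0
--     # przechodzimy przez wszystkie możliwe podnapisy
--     for i in range(len(data_input)):
--         for j in range(i+1, len(data_input)+1):
--             # sprawdzamy, czy podnapis o indeksach (i, j) jest antysymetryczny
--             #i, j - начальный индекс и индекс остановки соответственно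
--             if antisymmetrics(data_input[i:j]):
--                 output += data_input[i:j]
--                 output += " "
--                 count += 1
--     return count
-- ===== SOURCE B (Python) =====
-- def amount_antisymmetrics_fragments(data_input, output):
--     # Center-gap expansion: for each gap between positions c-1 and c, extend
--     # outward while mirror pairs differ; each extension step is one
--     # antisymmetric substring.  Only even-length substrings can qualify.
--     s = data_input
--     n = len(s)
--     count = 0
--     for c in range(1, n):
--         k = 0
--         while k < c and c + k < n and s[c - 1 - k] != s[c + k]:
--             k += 1
--         count += k
--     return count
-- ===== Notes on version B (the rewrite author's own statement) =====
-- stated objective: faster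
-- what changed: Replaces A's enumeration of all O(n^2) substrings, each re-checked character by character, with center-gap expansion: for each of the n-1 gaps, count the contiguous run of differing mirror pairs around it; each extension step corresponds to exactly one antisymmetric substring.
import Mathlib
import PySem

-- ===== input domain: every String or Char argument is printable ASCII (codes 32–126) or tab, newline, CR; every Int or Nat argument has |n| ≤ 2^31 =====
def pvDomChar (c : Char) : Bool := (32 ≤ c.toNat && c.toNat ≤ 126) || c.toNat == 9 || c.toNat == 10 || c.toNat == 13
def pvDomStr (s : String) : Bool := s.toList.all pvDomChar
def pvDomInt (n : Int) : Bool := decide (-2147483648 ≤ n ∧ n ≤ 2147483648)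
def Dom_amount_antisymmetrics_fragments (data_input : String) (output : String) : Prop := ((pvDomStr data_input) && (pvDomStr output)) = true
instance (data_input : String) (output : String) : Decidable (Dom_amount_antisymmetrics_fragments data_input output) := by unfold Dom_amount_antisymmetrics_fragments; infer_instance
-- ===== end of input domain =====

-- B replaces A's all-substrings scan with center-gap expansion (per gap, count the
-- contiguous run of differing mirror pairs); objective: faster. Return value only —
-- A's `output` parameter is a local Python string the function never returns.

-- ===== PORT A =====
-- helper `antisymmetrics`: for i in range(len(s)): if s[i] == s[-i-1]: return False / return True
def antisymLoopA (s : List Char) : List Int → Bool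
  | [] => true
  | i :: rest =>
    if PySem.List.pyGet? s i = PySem.List.pyGet? s (-i - 1) then false
    else antisymLoopA s rest

def antisymmetricsA (s : List Char) : Bool :=
  antisymLoopA s (PySem.List.pyRange 0 (s.length : Int) 1)

def amount_antisymmetrics_fragments (data_input : String) (output : String) : Int :=
  let s := data_input.toList
  let n : Int := (s.length : Int)
  -- state = (count, output); for i in range(n): for j in range(i+1, n+1): …
  let r := (PySem.List.pyRange 0 n 1).foldl (fun (st : Int × List Char) i =>
      (PySem.List.pyRange (i + 1) (n + 1) 1).foldl (fun (st : Int × List Char) j =>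
        let frag := PySem.List.slice s (some i) (some j)
        if antisymmetricsA frag then (st.1 + 1, st.2 ++ frag ++ [' ']) else st) st)
    (0, output.toList)
  r.1

-- ===== PORT B =====
-- while k < c and c + k < n and s[c-1-k] != s[c+k]: k += 1   (the guard keeps both
-- indices in range, so `getD` is exact for Python's s[...] here)
def extLoopB (s : List Char) (c k : Nat) : Nat :=
  if h : k < c ∧ c + k < s.length ∧ s.getD (c - 1 - k) ' ' ≠ s.getD (c + k) ' ' then
    extLoopB s c (k + 1)
  else k
termination_by s.length - (c + k)
decreasing_by omega

def amount_antisymmetrics_fragments_alt (data_input : String) (output : String) : Int :=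
  let s := data_input.toList
  -- for c in range(1, n): count += extension at gap c
  ((List.range s.length).drop 1).foldl (fun acc c => acc + (extLoopB s c 0 : Int)) 0

-- ===== PRECONDITION & SPEC =====
def Spec_amount_antisymmetrics_fragments (data_input : String) (output : String) (out : Int) : Prop := out = amount_antisymmetrics_fragments_alt data_input output
instance (data_input : String) (output : String) (out : Int) : Decidable (Spec_amount_antisymmetrics_fragments data_input output out) := by unfold Spec_amount_antisymmetrics_fragments; infer_instance

-- ===== CLAIM (what is proved, stated in full; the proofs are below) =====
def Claim_equal_amount_antisymmetrics_fragments : Prop := ∀ (data_input : String) (output : String), Dom_amount_antisymmetrics_fragments data_input output → Spec_amount_antisymmetrics_fragments data_input output (amount_antisymmetrics_fragments data_input output)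

-- ===== LEMMAS AND PROOFS =====

-- mismatching mirror pair at gap c, offset u (Bool-valued so Finset.filter needs no new instances)
def pvG (s : List Char) (c u : Nat) : Bool :=
  decide (u < c) && decide (c + u < s.length) &&
    !(s.getD (c - 1 - u) ' ' == s.getD (c + u) ' ')

-- A's substring test on a (start, stop) pair, in Nat form
def pvPA (s : List Char) (i j : Nat) : Bool := antisymmetricsA ((s.drop i).take (j - i))

lemma pvG_iff (s : List Char) (c u : Nat) :
    pvG s c u = true ↔ u < c ∧ c + u < s.length ∧ s.getD (c - 1 - u) ' ' ≠ s.getD (c + u) ' ' := by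
  simp [pvG]; tauto

-- ---- characterisation of B's extension loop ----
lemma extLoopB_G (s : List Char) (c k : Nat) :
    ∀ u, k ≤ u → u < extLoopB s c k → pvG s c u = true := by
  fun_induction extLoopB with
  | case1 k h ih =>
    intro u hku hu
    rcases Nat.eq_or_lt_of_le hku with rfl | h2
    · rw [pvG_iff]; exact h
    · exact ih u h2 hu
  | case2 k h =>
    intro u hku hu; omega

lemma extLoopB_not (s : List Char) (c k : Nat) : pvG s c (extLoopB s c k) = false := by
  fun_induction extLoopB with
  | case1 k h ih => exact ih
  | case2 k h =>
    rw [← Bool.not_eq_true, pvG_iff]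
    exact h

lemma extLoopB_iff (s : List Char) (c m : Nat) :
    (∀ u < m, pvG s c u = true) ↔ m ≤ extLoopB s c 0 := by
  constructor
  · intro h
    by_contra hm
    have h1 := extLoopB_not s c 0
    have := h (extLoopB s c 0) (by omega)
    simp [this] at h1
  · intro hm u hu
    exact extLoopB_G s c 0 u (Nat.zero_le _) (by omega)

lemma extLoopB_le_length (s : List Char) (c : Nat) : extLoopB s c 0 ≤ s.length := by
  rcases Nat.eq_zero_or_pos (extLoopB s c 0) with h | h
  · omega
  · have := extLoopB_G s c 0 (extLoopB s c 0 - 1) (by omega) (by omega)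
    rw [pvG_iff] at this
    omega

lemma extLoopB_zero (s : List Char) : extLoopB s 0 0 = 0 := by
  rw [extLoopB]; simp

-- ---- characterisation of A's antisymmetry check ----
lemma antisymLoopA_iff (s : List Char) (L : List Int) :
    antisymLoopA s L = true ↔ ∀ i ∈ L, PySem.List.pyGet? s i ≠ PySem.List.pyGet? s (-i - 1) := by
  induction L with
  | nil => simp [antisymLoopA]
  | cons a t ih =>
    simp only [antisymLoopA, List.mem_cons]
    split_ifs with h
    · simp only [false_iff]
      intro hv
      exact hv a (Or.inl rfl) h
    · rw [ih]
      constructor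
      · rintro hv i (rfl | hi); exact h; exact hv i hi
      · intro hv i hi; exact hv i (Or.inr hi)

lemma pyGet?_nat_getD (s : List Char) (t : Nat) (ht : t < s.length) :
    PySem.List.pyGet? s (t : Int) = some (s.getD t ' ') := by
  rw [PySem.List.pyGet?_natCast, List.getElem?_eq_getElem ht, List.getD_eq_getElem s ' ' ht]

lemma pyGet?_neg_getD (s : List Char) (t : Nat) (ht : t < s.length) :
    PySem.List.pyGet? s (-(t : Int) - 1) = some (s.getD (s.length - 1 - t) ' ') := by
  rw [show -(t:Int) - 1 = -(((t + 1 : Nat) : Int)) from by push_cast; ring]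
  rw [PySem.List.pyGet?_neg_natCast s (t+1) (by omega) (by omega)]
  rw [List.getElem?_eq_getElem (by omega), List.getD_eq_getElem s ' ' (by omega)]
  congr 2
  omega

lemma antisymmetricsA_iff (s : List Char) :
    antisymmetricsA s = true ↔
      ∀ t : Nat, t < s.length → s.getD t ' ' ≠ s.getD (s.length - 1 - t) ' ' := by
  rw [antisymmetricsA, antisymLoopA_iff]
  constructor
  · intro h t ht
    have := h (t : Int) (by rw [PySem.List.mem_pyRange_one]; omega)
    rw [pyGet?_nat_getD s t ht, pyGet?_neg_getD s t ht] at this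
    simpa using this
  · intro h i hi
    rw [PySem.List.mem_pyRange_one] at hi
    have ht : i.toNat < s.length := by omega
    have hi' : i = ((i.toNat : Nat) : Int) := by omega
    rw [hi', pyGet?_nat_getD s i.toNat ht, pyGet?_neg_getD s i.toNat ht]
    simpa using h i.toNat ht

lemma sub_length (s : List Char) (i j : Nat) (hj : j ≤ s.length) :
    ((s.drop i).take (j - i)).length = j - i := by
  simp
  omega

lemma sub_getD (s : List Char) (i j t : Nat) (ht : t < j - i) (hj : j ≤ s.length) :
    ((s.drop i).take (j - i)).getD t ' ' = s.getD (i + t) ' ' := by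
  have h1 : t < ((s.drop i).take (j - i)).length := by rw [sub_length s i j hj]; omega
  rw [List.getD_eq_getElem _ ' ' h1, List.getD_eq_getElem s ' ' (by omega)]
  rw [List.getElem_take, List.getElem_drop]

-- A's test holds on (i, j) iff j = i + 2k with k ≥ 1 differing mirror pairs at gap i + k
lemma pvPA_iff (s : List Char) (i j : Nat) (hij : i < j) (hj : j ≤ s.length) :
    pvPA s i j = true ↔ ∃ k : Nat, j = i + 2 * k ∧ 1 ≤ k ∧ ∀ u < k, pvG s (i + k) u = true := by
  rw [pvPA, antisymmetricsA_iff]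
  rw [sub_length s i j hj]
  constructor
  · intro h
    -- the length must be even: otherwise the middle index contradicts h
    have heven : (j - i) % 2 = 0 := by
      by_contra hodd
      have hm : (j - i) / 2 < j - i := by omega
      have := h ((j - i) / 2) hm
      rw [sub_getD s i j _ hm hj, sub_getD s i j _ (by omega) hj] at this
      apply this
      congr 1
      omega
    refine ⟨(j - i) / 2, by omega, by omega, ?_⟩
    intro u hu
    rw [pvG_iff]
    refine ⟨by omega, by omega, ?_⟩
    have hm : (j - i) / 2 - 1 - u < j - i := by omega
    have := h ((j - i) / 2 - 1 - u) (by omega)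
    rw [sub_getD s i j _ (by omega) hj, sub_getD s i j _ (by omega) hj] at this
    rw [show i + (j - i) / 2 - 1 - u = i + ((j - i) / 2 - 1 - u) from by omega]
    rw [show i + (j - i) / 2 + u = i + (j - i - 1 - ((j - i) / 2 - 1 - u)) from by omega]
    exact this
  · rintro ⟨k, rfl, hk1, hQ⟩
    intro t ht
    rw [sub_getD s i _ t (by omega) hj, sub_getD s i _ _ (by omega) hj]
    rcases Nat.lt_or_ge t k with h1 | h1
    · have := hQ (k - 1 - t) (by omega)
      rw [pvG_iff] at this
      rw [show i + t = i + k - 1 - (k - 1 - t) from by omega]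
      rw [show i + (i + 2 * k - i - 1 - t) = i + k + (k - 1 - t) from by omega]
      exact this.2.2
    · have := hQ (t - k) (by omega)
      rw [pvG_iff] at this
      rw [show i + t = i + k + (t - k) from by omega]
      rw [show i + (i + 2 * k - i - 1 - t) = i + k - 1 - (t - k) from by omega]
      exact this.2.2.symm

-- ---- counting: both sides are the cardinality of the same set of substrings ----
lemma countP_range_eq (m : Nat) (p : Nat → Bool) :
    (List.range m).countP p = ∑ k ∈ Finset.range m, if p k then 1 else 0 := by
  induction m with
  | zero => simp
  | succ m ih =>
    rw [List.range_succ, List.countP_append, Finset.sum_range_succ, ih]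
    simp [List.countP_cons]

lemma cnt_eq_card (s : List Char) (i : Nat) :
    (List.range (s.length - i)).countP (fun k => pvPA s i (i + 1 + k))
      = ((Finset.range (s.length + 1)).filter
          (fun j => i < j ∧ pvPA s i j = true)).card := by
  rw [countP_range_eq]
  rw [show (∑ k ∈ Finset.range (s.length - i), if pvPA s i (i + 1 + k) then 1 else 0)
      = ((Finset.range (s.length - i)).filter (fun k => pvPA s i (i + 1 + k) = true)).card from by
    rw [Finset.card_filter]]
  apply Finset.card_nbij' (i := fun k => i + 1 + k) (j := fun j => j - i - 1)
  · intro k hk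
    simp only [Finset.coe_filter, Set.mem_setOf_eq, Finset.mem_range] at hk ⊢
    exact ⟨by omega, by omega, hk.2⟩
  · intro j hj
    simp only [Finset.coe_filter, Set.mem_setOf_eq, Finset.mem_range] at hj ⊢
    refine ⟨by omega, ?_⟩
    rw [show i + 1 + (j - i - 1) = j from by omega]
    exact hj.2.2
  · intro k _
    show i + 1 + k - i - 1 = k
    omega
  · intro j hj
    simp only [Finset.coe_filter, Set.mem_setOf_eq, Finset.mem_range] at hj
    show i + 1 + (j - i - 1) = j
    omega

lemma ext_eq_card (s : List Char) (c : Nat) :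
    extLoopB s c 0
      = ((Finset.range (s.length + 1)).filter
          (fun k => 1 ≤ k ∧ ∀ u < k, pvG s c u = true)).card := by
  have hle := extLoopB_le_length s c
  have : ((Finset.range (s.length + 1)).filter (fun k => 1 ≤ k ∧ ∀ u < k, pvG s c u = true))
      = Finset.Icc 1 (extLoopB s c 0) := by
    apply Finset.ext
    intro k
    simp only [Finset.mem_filter, Finset.mem_range, Finset.mem_Icc]
    constructor
    · rintro ⟨_, h1, hQ⟩
      exact ⟨h1, (extLoopB_iff s c k).mp hQ⟩
    · rintro ⟨h1, h2⟩
      exact ⟨by omega, h1, (extLoopB_iff s c k).mpr h2⟩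
  rw [this, Nat.card_Icc]
  omega

lemma key_count (s : List Char) :
    (∑ i ∈ Finset.range s.length,
        (List.range (s.length - i)).countP (fun k => pvPA s i (i + 1 + k)))
      = ∑ c ∈ Finset.range s.length, extLoopB s c 0 := by
  calc (∑ i ∈ Finset.range s.length,
          (List.range (s.length - i)).countP (fun k => pvPA s i (i + 1 + k)))
      = ∑ i ∈ Finset.range s.length, ∑ j ∈ Finset.range (s.length + 1),
          if i < j ∧ pvPA s i j = true then 1 else 0 := by
        refine Finset.sum_congr rfl fun i _ => ?_
        rw [cnt_eq_card, Finset.card_filter]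
    _ = ((Finset.range s.length ×ˢ Finset.range (s.length + 1)).filter
          (fun p => p.1 < p.2 ∧ pvPA s p.1 p.2 = true)).card := by
        rw [Finset.card_filter, Finset.sum_product]
    _ = ((Finset.range s.length ×ˢ Finset.range (s.length + 1)).filter
          (fun p => 1 ≤ p.2 ∧ ∀ u < p.2, pvG s p.1 u = true)).card := by
        -- the bijection (i, j) ↦ (center, half-length) = ((i+j)/2, (j-i)/2)
        apply Finset.card_nbij' (i := fun p => (p.1 + (p.2 - p.1) / 2, (p.2 - p.1) / 2))
          (j := fun p => (p.1 - p.2, p.1 + p.2))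
        · rintro ⟨a, b⟩ hp
          simp only [Finset.coe_filter, Set.mem_setOf_eq, Finset.mem_product, Finset.mem_range] at hp ⊢
          obtain ⟨⟨ha, hb⟩, hab, hPA⟩ := hp
          obtain ⟨k, rfl, hk1, hQ⟩ := (pvPA_iff s a _ hab (by omega)).mp hPA
          have hk : (a + 2 * k - a) / 2 = k := by omega
          rw [hk]
          have h0 := hQ 0 (by omega)
          rw [pvG_iff] at h0
          exact ⟨⟨by omega, by omega⟩, by omega, hQ⟩
        · rintro ⟨c, k⟩ hp
          simp only [Finset.coe_filter, Set.mem_setOf_eq, Finset.mem_product, Finset.mem_range] at hp ⊢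
          obtain ⟨⟨hc, hk⟩, hk1, hQ⟩ := hp
          have h0 := hQ 0 (by omega)
          have hl := hQ (k - 1) (by omega)
          rw [pvG_iff] at h0 hl
          refine ⟨⟨by omega, by omega⟩, by omega, ?_⟩
          rw [pvPA_iff s (c - k) (c + k) (by omega) (by omega)]
          refine ⟨k, by omega, hk1, ?_⟩
          rw [show c - k + k = c from by omega]
          exact hQ
        · rintro ⟨a, b⟩ hp
          simp only [Finset.coe_filter, Set.mem_setOf_eq, Finset.mem_product, Finset.mem_range] at hp
          obtain ⟨⟨ha, hb⟩, hab, hPA⟩ := hp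
          obtain ⟨k, rfl, hk1, hQ⟩ := (pvPA_iff s a _ hab (by omega)).mp hPA
          simp only [Prod.mk.injEq]
          omega
        · rintro ⟨c, k⟩ hp
          simp only [Finset.coe_filter, Set.mem_setOf_eq, Finset.mem_product, Finset.mem_range] at hp
          obtain ⟨⟨hc, hk⟩, hk1, hQ⟩ := hp
          have hl := hQ (k - 1) (by omega)
          rw [pvG_iff] at hl
          simp only [Prod.mk.injEq]
          omega
    _ = ∑ c ∈ Finset.range s.length, ∑ k ∈ Finset.range (s.length + 1),
          if 1 ≤ k ∧ ∀ u < k, pvG s c u = true then 1 else 0 := by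
        rw [Finset.card_filter, Finset.sum_product]
    _ = ∑ c ∈ Finset.range s.length, extLoopB s c 0 := by
        refine Finset.sum_congr rfl fun c _ => ?_
        rw [ext_eq_card, Finset.card_filter]

-- ---- fold bookkeeping: A's loops as a countP sum, B's loop as a sum ----
lemma innerA_fst (s : List Char) (i : Int) (L : List Int) (st : Int × List Char) :
    (L.foldl (fun (st : Int × List Char) j =>
        let frag := PySem.List.slice s (some i) (some j)
        if antisymmetricsA frag then (st.1 + 1, st.2 ++ frag ++ [' ']) else st) st).1
      = st.1 + (L.countP (fun j => antisymmetricsA (PySem.List.slice s (some i) (some j))) : Int) := by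
  induction L generalizing st with
  | nil => simp
  | cons a t ih =>
    simp only [List.foldl_cons, List.countP_cons, ih]
    split_ifs <;> simp <;> ring

lemma outerA_fst (s : List Char) (n : Int) (L : List Int) (st : Int × List Char) :
    (L.foldl (fun (st : Int × List Char) i =>
        (PySem.List.pyRange (i + 1) (n + 1) 1).foldl (fun (st : Int × List Char) j =>
          let frag := PySem.List.slice s (some i) (some j)
          if antisymmetricsA frag then (st.1 + 1, st.2 ++ frag ++ [' ']) else st) st) st).1
      = st.1 + (L.map (fun i =>
          ((PySem.List.pyRange (i + 1) (n + 1) 1).countP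
            (fun j => antisymmetricsA (PySem.List.slice s (some i) (some j))) : Int))).sum := by
  induction L generalizing st with
  | nil => simp
  | cons a t ih =>
    simp only [List.foldl_cons, List.map_cons, List.sum_cons, ih, innerA_fst]
    ring

lemma sum_map_range {M : Type} [AddCommMonoid M] (m : Nat) (f : Nat → M) :
    ((List.range m).map f).sum = ∑ i ∈ Finset.range m, f i := by
  induction m with
  | zero => simp
  | succ m ih => rw [List.range_succ, List.map_append, List.sum_append, Finset.sum_range_succ, ih]; simp

lemma cntA_eq_cntNat (s : List Char) (i : Nat) :
    ((PySem.List.pyRange ((i : Int) + 1) ((s.length : Int) + 1) 1).countP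
        (fun j => antisymmetricsA (PySem.List.slice s (some (i : Int)) (some j))))
      = (List.range (s.length - i)).countP (fun k => pvPA s i (i + 1 + k)) := by
  rw [show ((i : Int) + 1) = ((i + 1 : Nat) : Int) from by push_cast; ring]
  rw [show ((s.length : Int) + 1) = ((s.length + 1 : Nat) : Int) from by push_cast; ring]
  rw [PySem.List.pyRange_one]
  rw [List.countP_map]
  rw [show (((s.length + 1 : Nat) : Int) - ((i + 1 : Nat) : Int)).toNat = s.length - i from by omega]
  apply List.countP_congr
  intro k _
  simp only [Function.comp_apply]
  rw [show ((i + 1 : Nat) : Int) + (k : Int) = ((i + 1 + k : Nat) : Int) from by push_cast; ring]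
  rw [PySem.List.slice_natCast]
  rw [pvPA]

theorem main_eq (data_input output : String) :
    amount_antisymmetrics_fragments data_input output
      = amount_antisymmetrics_fragments_alt data_input output := by
  rw [amount_antisymmetrics_fragments, amount_antisymmetrics_fragments_alt]
  simp only []
  rw [outerA_fst]
  rw [PySem.List.foldl_add]
  rw [PySem.List.pyRange_zero]
  rw [Int.toNat_natCast]
  rw [List.map_map, sum_map_range]
  simp only [Function.comp_apply]
  have hA : ∀ i : Nat, ((PySem.List.pyRange ((i : Int) + 1) ((data_input.toList.length : Int) + 1) 1).countP
        (fun j => antisymmetricsA (PySem.List.slice data_input.toList (some (i : Int)) (some j))) : Int)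
      = ((List.range (data_input.toList.length - i)).countP (fun k => pvPA data_input.toList i (i + 1 + k)) : Int) := by
    intro i; exact_mod_cast congrArg (Nat.cast (R := Int)) (cntA_eq_cntNat data_input.toList i)
  rw [Finset.sum_congr rfl (fun i _ => hA i)]
  rw [show (∑ i ∈ Finset.range data_input.toList.length,
        ((List.range (data_input.toList.length - i)).countP (fun k => pvPA data_input.toList i (i + 1 + k)) : Int))
      = ((∑ i ∈ Finset.range data_input.toList.length,
        (List.range (data_input.toList.length - i)).countP (fun k => pvPA data_input.toList i (i + 1 + k)) : Nat) : Int) from by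
    push_cast; rfl]
  rw [key_count]
  cases data_input.toList.length with
  | zero => simp
  | succ m =>
    rw [List.range_succ_eq_map, List.drop_one, List.tail_cons, List.map_map, sum_map_range]
    rw [Finset.sum_range_succ', extLoopB_zero]
    push_cast
    simp [Nat.succ_eq_add_one]

-- ===== VERDICT (by name: the statement is the Claim_ definition above) =====
theorem amount_antisymmetrics_fragments_spec : Claim_equal_amount_antisymmetrics_fragments := by
  intro data_input output _
  unfold Spec_amount_antisymmetrics_fragments
  exact main_eq data_input output
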